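-- pv_equiv track=rewrite | github.com/shlomota/MeloDetective | analyze_nahawand.py | generate_nahawand_scale
-- ===== SOURCE A (Python) =====
-- from typing import List, Tuple
--
-- def generate_nahawand_scale(shift: int = 9, starting_note: int = 57) -> List[int]:
--     """
--     Generate a Nahawand scale with the specified shift.
--
--     Args:
--         shift: The shift value (0-11)
--         starting_note: The MIDI note number of the starting note
--
--     Returns:
--         List of MIDI note numbers in the Nahawand scale
--     """
--     # The correct semitone positions for Nahawand (natural minor scale)
--     semitone_positions = [0, 2, 3, 5, 7, 8, 10]
--
--     # Generate 5 octaves of the maqam scale centered around the starting note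
--     maqam_scale = []
--     base_octave = (starting_note // 12) - 2  # Start 2 octaves below
--     for octave in range(base_octave, base_octave + 5):  # 5 octaves total
--         for pos in semitone_positions:
--             note = octave * 12 + pos + shift
--             maqam_scale.append(note)
--
--     return sorted(maqam_scale)
-- ===== SOURCE B (Python) =====
-- def generate_nahawand_scale(shift: int = 9, starting_note: int = 57):
--     """Single ascending scan over one 59-semitone range, filtering by pitch class."""
--     base = ((starting_note // 12) - 2) * 12 + shift
--     pitch_classes = {0, 2, 3, 5, 7, 8, 10}
--     return [n for n in range(base, base + 59) if (n - shift) % 12 in pitch_classes]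
-- ===== Notes on version B (the rewrite author's own statement) =====
-- stated objective: alternative
-- what changed: Replaces the nested octave/position loops plus a final sort by one ascending scan of the single inclusive semitone range, keeping notes whose pitch class (n - shift) % 12 lies in the natural-minor set, so the list is emitted already sorted.
import Mathlib
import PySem

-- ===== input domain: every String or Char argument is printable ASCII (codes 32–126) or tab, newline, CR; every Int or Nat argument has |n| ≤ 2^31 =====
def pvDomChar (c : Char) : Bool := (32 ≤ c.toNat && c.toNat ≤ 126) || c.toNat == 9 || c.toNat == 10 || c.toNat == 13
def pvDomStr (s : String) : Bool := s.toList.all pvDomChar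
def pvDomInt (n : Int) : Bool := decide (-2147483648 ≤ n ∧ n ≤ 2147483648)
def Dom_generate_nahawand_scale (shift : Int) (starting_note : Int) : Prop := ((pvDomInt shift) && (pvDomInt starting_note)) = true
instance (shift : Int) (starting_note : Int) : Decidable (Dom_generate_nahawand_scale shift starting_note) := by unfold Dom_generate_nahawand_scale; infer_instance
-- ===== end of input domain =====

-- B replaces the nested octave/position loops plus sort by one ascending scan filtered by pitch class (alternative decomposition, same cost).

-- ===== PORT A =====
def generate_nahawand_scale (shift : Int) (starting_note : Int) : List Int :=
  let semitone_positions : List Int := [0, 2, 3, 5, 7, 8, 10]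
  let base_octave : Int := PySem.Int.floordiv starting_note 12 - 2
  let maqam_scale : List Int :=
    (PySem.List.pyRange base_octave (base_octave + 5) 1).foldl
      (fun acc octave =>
        semitone_positions.foldl
          (fun acc pos => acc ++ [octave * 12 + pos + shift]) acc) []
  PySem.List.sorted maqam_scale (fun x => x) false

-- ===== PORT B =====
def generate_nahawand_scale_alt (shift : Int) (starting_note : Int) : List Int :=
  let base : Int := (PySem.Int.floordiv starting_note 12 - 2) * 12 + shift
  let pitch_classes : List Int := [0, 2, 3, 5, 7, 8, 10]
  (PySem.List.pyRange base (base + 59) 1).filter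
    (fun n => decide (PySem.Int.mod (n - shift) 12 ∈ pitch_classes))

-- ===== PRECONDITION & SPEC =====
def Spec_generate_nahawand_scale (shift : Int) (starting_note : Int) (out : List Int) : Prop := out = generate_nahawand_scale_alt shift starting_note
instance (shift : Int) (starting_note : Int) (out : List Int) : Decidable (Spec_generate_nahawand_scale shift starting_note out) := by unfold Spec_generate_nahawand_scale; infer_instance

-- ===== CLAIM (what is proved, stated in full; the proofs are below) =====
def Claim_equal_generate_nahawand_scale : Prop := ∀ (shift : Int) (starting_note : Int), Dom_generate_nahawand_scale shift starting_note → Spec_generate_nahawand_scale shift starting_note (generate_nahawand_scale shift starting_note)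

-- ===== LEMMAS AND PROOFS =====

-- the 35 semitone offsets of 5 natural-minor octaves, in ascending order
def pvOffs : List Nat := [0, 2, 3, 5, 7, 8, 10, 12, 14, 15, 17, 19, 20, 22, 24, 26, 27, 29, 31, 32, 34, 36, 38, 39, 41, 43, 44, 46, 48, 50, 51, 53, 55, 56, 58]

theorem pvA_raw (shift t : Int) :
    (PySem.List.pyRange (t-2) (t-2 + 5) 1).foldl
      (fun acc octave =>
        ([0, 2, 3, 5, 7, 8, 10] : List Int).foldl
          (fun acc pos => acc ++ [octave * 12 + pos + shift]) acc) []
    = List.map (fun k : Nat => (t-2)*12+shift + (k:Int)) pvOffs := by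
  rw [show PySem.List.pyRange (t-2) (t-2+5) 1 = [t-2, t-1, t, t+1, t+2] from by
    rw [PySem.List.pyRange_one]; norm_num; simp [List.range_succ]; omega]
  simp only [List.foldl, pvOffs, List.map, List.nil_append, List.cons_append]
  norm_num
  refine ⟨by ring, by ring, by ring, by ring, by ring, by ring, by ring, by ring, by ring,
    by ring, by ring, by ring, by ring, by ring, by ring, by ring, by ring, by ring, by ring,
    by ring, by ring, by ring, by ring, by ring, by ring, by ring, by ring, by ring, by ring,
    by ring, by ring, by ring, by ring, by ring⟩

theorem pvB_explicit (shift t : Int) :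
    (PySem.List.pyRange ((t-2)*12+shift) ((t-2)*12+shift + 59) 1).filter
      (fun n => decide (PySem.Int.mod (n - shift) 12 ∈ ([0,2,3,5,7,8,10] : List Int)))
    = List.map (fun k : Nat => (t-2)*12+shift + (k:Int)) pvOffs := by
  rw [PySem.List.pyRange_one]
  rw [show (t-2)*12+shift + 59 - ((t-2)*12+shift) = 59 from by ring]
  show (List.filter _ (List.map (fun k : Nat => (t-2)*12+shift + (k:Int)) (List.range 59))) = _
  rw [List.filter_map]
  rw [List.filter_congr (q := fun k : Nat => decide ((k % 12 : Nat) ∈ ([0,2,3,5,7,8,10] : List Nat)))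
      (by
        intro k _
        simp only [Function.comp]
        have hm : PySem.Int.mod ((t-2)*12+shift + (k:Int) - shift) 12 = ((k % 12 : Nat) : Int) := by
          rw [PySem.Int.mod_eq_emod_of_pos (by norm_num)]
          omega
        simp only [hm, List.mem_cons, List.not_mem_nil, or_false, decide_eq_decide]
        omega)]
  rw [show (List.range 59).filter (fun k : Nat => decide ((k % 12 : Nat) ∈ ([0,2,3,5,7,8,10] : List Nat))) = pvOffs from by decide]

theorem pvOffs_pairwise : pvOffs.Pairwise (· ≤ ·) := by decide

-- ===== VERDICT (by name: the statement is the Claim_ definition above) =====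
theorem generate_nahawand_scale_spec : Claim_equal_generate_nahawand_scale := by
  intro shift starting_note _
  unfold Spec_generate_nahawand_scale generate_nahawand_scale generate_nahawand_scale_alt
  simp only []
  generalize PySem.Int.floordiv starting_note 12 = t
  rw [pvA_raw shift t, pvB_explicit shift t]
  apply PySem.List.sorted_eq_self_of_pairwise
  rw [List.pairwise_map]
  exact pvOffs_pairwise.imp (fun h => by omega)
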